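-- pv_equiv track=rewrite | github.com/pritomrajkhowa/WEB_VfPbP | wolfformSolution.py | simpleToken
-- ===== SOURCE A (Python) =====
-- def simpleToken(inputExpression):
--     Toknext=None
--     Tokprev=None
--     TokenList =[]
--     # Iterate over index
--     for element in range(0, len(inputExpression)):
--         if inputExpression[element]:
--            if inputExpression[element].isdigit()==True or inputExpression[element].isalpha()==True or inputExpression[element]=='_':
--               if Tokprev is None:
--                  Tokprev = inputExpression[element]
--               else:
--                  Tokprev = Tokprev + inputExpression[element]
--            elif inputExpression[element] in ['+','*','^','/','%','-','=','>','<','(',')']: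
--                 if Tokprev is not None:
--                    TokenList.append(Tokprev)
--                    Tokprev=None
--                 TokenList.append(inputExpression[element])
--            elif inputExpression[element]==' ':
--                 if Tokprev is not None:
--                    TokenList.append(Tokprev)
--                    Tokprev=None
--                 TokenList.append(inputExpression[element])
--     if Tokprev is not None:
--        TokenList.append(Tokprev)
--     return TokenList
-- ===== SOURCE B (Python) =====
-- def simpleToken(inputExpression):
--     seps = '+*^/%-=><() '
--     chars = [c for c in inputExpression
--              if c.isdigit() or c.isalpha() or c == '_' or c in seps]
--     out = []
--     i = 0
--     n = len(chars)
--     while i < n: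
--         if chars[i] in seps:
--             out.append(chars[i])
--             i += 1
--         else:
--             j = i
--             while j < n and chars[j] not in seps:
--                 j += 1
--             out.append(''.join(chars[i:j]))
--             i = j
--     return out
-- ===== Notes on version B (the rewrite author's own statement) =====
-- stated objective: alternative
-- what changed: Replaces A's character-by-character accumulator state machine (pending-token variable flushed on each separator) with a filter pass that drops ignored characters followed by a run-splitting scan that emits each maximal identifier run with one slice and each separator individually.
import Mathlib
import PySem

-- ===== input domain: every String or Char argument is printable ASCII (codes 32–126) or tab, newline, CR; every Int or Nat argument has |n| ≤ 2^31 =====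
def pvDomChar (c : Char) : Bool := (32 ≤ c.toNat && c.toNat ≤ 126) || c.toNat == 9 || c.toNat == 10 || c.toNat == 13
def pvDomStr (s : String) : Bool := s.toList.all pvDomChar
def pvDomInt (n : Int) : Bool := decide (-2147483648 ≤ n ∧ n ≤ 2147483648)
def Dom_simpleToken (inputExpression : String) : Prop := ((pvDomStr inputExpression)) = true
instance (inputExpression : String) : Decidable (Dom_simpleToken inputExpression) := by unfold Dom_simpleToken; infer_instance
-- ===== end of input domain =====

-- B replaces A's pending-token accumulator state machine with a filter pass followed by a
-- run-splitting scan (alternative decomposition; equivalence of return values proved below).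


-- ===== PORT A =====
-- A's operator list ['+','*','^','/','%','-','=','>','<','(',')']
def opListA : List Char := ['+', '*', '^', '/', '%', '-', '=', '>', '<', '(', ')']

-- c.isdigit() or c.isalpha() or c == '_'
def isIdCharA (c : Char) : Bool := PySem.Chars.isdigit c || PySem.Chars.isalpha c || c == '_'

-- one iteration of A's loop body; Tokprev is the pending token (None ↔ none), chars kept
-- as List Char (Python string concatenation 'Tokprev + c' is p ++ [c]).
-- ('if inputExpression[element]:' is always true for a 1-char string and is dropped.)
def stepA (st : Option (List Char) × List String) (c : Char) : Option (List Char) × List String :=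
  if isIdCharA c then
    match st.1 with
    | none => (some [c], st.2)
    | some p => (some (p ++ [c]), st.2)
  else if c ∈ opListA then
    match st.1 with
    | some p => (none, st.2 ++ [String.ofList p] ++ [String.ofList [c]])
    | none => (none, st.2 ++ [String.ofList [c]])
  else if c == ' ' then
    match st.1 with
    | some p => (none, st.2 ++ [String.ofList p] ++ [String.ofList [c]])
    | none => (none, st.2 ++ [String.ofList [c]])
  else st

def simpleToken (inputExpression : String) : List String :=
  let st := inputExpression.toList.foldl stepA (none, [])
  match st.1 with
  | some p => st.2 ++ [String.ofList p]
  | none => st.2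

-- ===== PORT B =====
-- seps = '+*^/%-=><() '
def sepsB : List Char := ['+', '*', '^', '/', '%', '-', '=', '>', '<', '(', ')', ' ']

def keepB (c : Char) : Bool :=
  PySem.Chars.isdigit c || PySem.Chars.isalpha c || c == '_' || c ∈ sepsB

-- the outer while-loop of B: emit separators one by one, identifier runs as one slice
def runSplitB (chars : List Char) : List String :=
  match chars with
  | [] => []
  | c :: rest =>
    if c ∈ sepsB then
      String.ofList [c] :: runSplitB rest
    else
      String.ofList (c :: rest.takeWhile (fun d => !(d ∈ sepsB))) ::
        runSplitB (rest.dropWhile (fun d => !(d ∈ sepsB)))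
termination_by chars.length
decreasing_by
  · simp
  · have := List.length_dropWhile_le (fun d => !(d ∈ sepsB)) rest
    simp at this ⊢; omega

def simpleToken_alt (inputExpression : String) : List String :=
  runSplitB (inputExpression.toList.filter keepB)

-- ===== PRECONDITION & SPEC =====
def Spec_simpleToken (inputExpression : String) (out : List String) : Prop := out = simpleToken_alt inputExpression
instance (inputExpression : String) (out : List String) : Decidable (Spec_simpleToken inputExpression out) := by unfold Spec_simpleToken; infer_instance

-- ===== CLAIM (what is proved, stated in full; the proofs are below) =====
def Claim_equal_simpleToken : Prop := ∀ (inputExpression : String), Dom_simpleToken inputExpression → Spec_simpleToken inputExpression (simpleToken inputExpression)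

-- ===== LEMMAS AND PROOFS =====

-- finishing step of A
def finishA (st : Option (List Char) × List String) : List String :=
  match st.1 with
  | some p => st.2 ++ [String.ofList p]
  | none => st.2

-- B's run-splitter with a pending prefix p (proof-side characterisation of A's state)
def runPend (p : List Char) (chars : List Char) : List String :=
  match chars with
  | [] => [String.ofList p]
  | c :: rest =>
    if c ∈ sepsB then String.ofList p :: String.ofList [c] :: runSplitB rest
    else runPend (p ++ [c]) rest

theorem runPend_eq (chars : List Char) : ∀ p, runPend p chars =
    String.ofList (p ++ chars.takeWhile (fun d => !(d ∈ sepsB))) ::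
      runSplitB (chars.dropWhile (fun d => !(d ∈ sepsB))) := by
  induction chars with
  | nil => intro p; simp [runPend, runSplitB]
  | cons c rest ih =>
    intro p
    by_cases hc : c ∈ sepsB
    · rw [runPend, List.takeWhile_cons_of_neg (by simp [hc]),
        List.dropWhile_cons_of_neg (by simp [hc]), runSplitB]
      simp [hc]
    · rw [runPend, List.takeWhile_cons_of_pos (by simp [hc]),
        List.dropWhile_cons_of_pos (by simp [hc])]
      simp only [hc, if_false, ih (p ++ [c]), List.append_assoc, List.singleton_append]

theorem runSplitB_id_cons (c : Char) (rest : List Char) (hc : ¬ c ∈ sepsB) :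
    runSplitB (c :: rest) = runPend [c] rest := by
  rw [runPend_eq, runSplitB]
  simp [hc]

theorem id_not_sep (c : Char) (h : isIdCharA c = true) : ¬ c ∈ sepsB := by
  intro hm
  fin_cases hm <;> revert h <;> decide

theorem main_inv (cs : List Char) : ∀ acc,
    (finishA (cs.foldl stepA (none, acc)) = acc ++ runSplitB (cs.filter keepB)) ∧
    (∀ p, finishA (cs.foldl stepA (some p, acc)) = acc ++ runPend p (cs.filter keepB)) := by
  induction cs with
  | nil => intro acc; simp [finishA, runSplitB, runPend]
  | cons c rest ih =>
    intro acc
    by_cases hid : isIdCharA c = true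
    · have hk : keepB c = true := by
        simp [isIdCharA] at hid; simp [keepB]; tauto
      have hns : ¬ c ∈ sepsB := id_not_sep c hid
      constructor
      · simp only [List.foldl_cons, stepA, hid, if_pos, List.filter_cons, hk]
        rw [(ih acc).2 [c], runSplitB_id_cons c _ hns]
      · intro p
        simp only [List.foldl_cons, stepA, hid, if_pos, List.filter_cons, hk]
        rw [(ih acc).2 (p ++ [c])]
        congr 1
        rw [runPend_eq, runPend_eq, List.takeWhile_cons_of_pos (by simp [hns]),
          List.dropWhile_cons_of_pos (by simp [hns])]
        simp
    · by_cases hsep : c ∈ sepsB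
      · have hk : keepB c = true := by simp [keepB]; tauto
        have hcase : c ∈ opListA ∨ c = ' ' := by
          fin_cases hsep <;> first | (left; decide) | (right; rfl)
        have hA : stepA (none, acc) c = (none, acc ++ [String.ofList [c]]) ∧
            ∀ p, stepA (some p, acc) c = (none, acc ++ [String.ofList p] ++ [String.ofList [c]]) := by
          rcases hcase with hop | hsp
          · constructor <;> [skip; intro p] <;> simp [stepA, hid, hop]
          · subst hsp
            constructor <;> [skip; intro p] <;> simp [stepA, isIdCharA, opListA] <;> decide
        constructor
        · simp only [List.foldl_cons, hA.1, List.filter_cons, hk]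
          rw [(ih (acc ++ [String.ofList [c]])).1]
          conv_rhs => rw [runSplitB.eq_def]
          simp [hsep]
        · intro p
          simp only [List.foldl_cons, hA.2 p, List.filter_cons, hk]
          rw [(ih (acc ++ [String.ofList p] ++ [String.ofList [c]])).1]
          conv_rhs => rw [runPend.eq_def]
          simp [hsep]
      · have hk : keepB c = false := by
          simp [isIdCharA] at hid; simp [keepB]; tauto
        have hop : ¬ c ∈ opListA := by
          intro hop; exact hsep (by fin_cases hop <;> decide)
        have hsp : ¬ c = ' ' := by intro h; subst h; exact hsep (by decide)
        have hA : ∀ st1, stepA (st1, acc) c = (st1, acc) := by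
          intro st1; simp [stepA, hid, hop, hsp]
        constructor
        · simp only [List.foldl_cons, hA, List.filter_cons, hk]
          exact (ih acc).1
        · intro p
          simp only [List.foldl_cons, hA, List.filter_cons, hk]
          exact (ih acc).2 p

-- ===== VERDICT (by name: the statement is the Claim_ definition above) =====
theorem simpleToken_spec : Claim_equal_simpleToken := by
  intro s _
  unfold Spec_simpleToken simpleToken simpleToken_alt
  have := (main_inv s.toList []).1
  simpa [finishA] using this
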